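-- pv_equiv track=rewrite | github.com/hannahnowxyz/puzzles | foobar/gearing-up-for-destruction.py | solution
-- ===== SOURCE A (Python) =====
-- def solution(pegs):
-- 	"""
-- 	to calculate the first radius:
-- 	let p(0), ..., p(N) be the sequence of pegs.
-- 	let r(0), ..., r(N) be the sequence of solution radii.
-- 	given any 1 radius, the others are fully determined by the relations
-- 		r(1) + r(0) = p(1) - p(0)
-- 		r(2) + r(1) = p(2) - p(1)
-- 		...
-- 		r(N) + r(N - 1) = p(N) - p(N - 1)
-- 		since each gear must fit exactly with its neighbors.
-- 	therefore, we can construct r(N) as a function of r(0) by the chain of substitutions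
-- 		r(1) = p(1) - p(0) - r(0)
-- 		r(2) = p(2) - p(1) - r(1) = p(2) - p(1) - (p(1) - p(0) - r(0)) = p(2) - 2 p(1) + p(0) + r(0)
-- 		...
-- 		r(N) = p(N) - 2 p(N - 1) + ... - 2 (-1)^N p(1) + (-1)^N p(0) + (-1)^N r(0)
-- 		and set r(N) = r(0)/2 to solve for r(0):
-- 			r(0) = -2/(2 (-1)^N - 1) (p(N) + ... + (-1)^N p(0))
-- 	the factor -2/(2 (-1)^N - 1) is either 2/3 if the number of pegs is even
-- 	or -2 if it's odd. however, to avoid floating point math, we use an expression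
-- 	which evaluates to either 2 or -6 in the even and odd cases respectively,
-- 	effectively calculating 3 times the first radius.
-- 	"""
-- 	l = len(pegs)
-- 	alt_sum = sum((1 - 2*(i % 2))*pegs[l - i - 1] for i in range(l))
-- 	first_radius_x3 = (2 - 8*(l % 2))*(2*alt_sum - pegs[l - 1] - (-1 + 2*(l % 2))*pegs[0])
-- 	#verify that solution exists
-- 	if first_radius_x3 < 3:
-- 		return [-1, -1]
-- 	last_radius = first_radius_x3
-- 	for i in range(l - 1):
-- 		next_radius = 3*(pegs[i + 1]  - pegs[i]) - last_radius
-- 		if next_radius < 3: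
-- 			return [-1, -1]
-- 		last_radius = next_radius
-- 	#solution exists, denominator 1 or 3?
-- 	if first_radius_x3 % 3 == 0:
-- 		return [int(first_radius_x3/3), 1]
-- 	return [first_radius_x3, 3]
-- ===== SOURCE B (Python) =====
-- def solution(pegs):
--     # Solve the linear recurrence r_i = (p_i - p_{i-1}) - r_{i-1} symbolically:
--     # r_i = a_i + (-1)^i * r0 with a_0 = 0, a_i = d_i - a_{i-1}; the closing
--     # constraint r_{N} = r0/2 gives r0; work with x3 = 3*r0 to stay in integers.
--     if not pegs:
--         return [-1, -1]
--     diffs = [q - p for p, q in zip(pegs, pegs[1:])]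
--     a = [0]
--     for d in diffs:
--         a.append(d - a[-1])
--     x3 = 2 * a[-1] if len(pegs) % 2 == 0 else -6 * a[-1]
--     # feasibility: every radius times 3, i.e. 3*a_i + (-1)^i * x3, must be >= 3
--     sign = 1
--     for ai in a:
--         if 3 * ai + sign * x3 < 3:
--             return [-1, -1]
--         sign = -sign
--     if x3 % 3 == 0:
--         return [x3 // 3, 1]
--     return [x3, 3]
-- ===== Notes on version B (the rewrite author's own statement) =====
-- stated objective: simpler
-- what changed: Instead of A's closed-form alternating sum over reversed indices combined by a parity sign formula plus a separate radius-recurrence verification loop, B solves the recurrence symbolically in one forward pass over consecutive differences, tracking each radius as an affine function a_i + (-1)^i*r0, closes the system with r_N = r0/2, and checks all radii uniformly from the stored constants.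
import Mathlib
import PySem

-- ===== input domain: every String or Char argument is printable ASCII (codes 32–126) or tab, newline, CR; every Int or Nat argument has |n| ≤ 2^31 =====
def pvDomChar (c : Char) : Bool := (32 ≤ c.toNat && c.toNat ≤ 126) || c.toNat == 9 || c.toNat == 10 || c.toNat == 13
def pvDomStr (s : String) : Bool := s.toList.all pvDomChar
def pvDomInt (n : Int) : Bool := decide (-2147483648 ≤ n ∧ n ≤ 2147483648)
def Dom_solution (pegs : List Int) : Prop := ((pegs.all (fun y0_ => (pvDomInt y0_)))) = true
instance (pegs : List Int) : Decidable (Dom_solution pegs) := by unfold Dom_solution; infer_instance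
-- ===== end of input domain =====

-- B replaces A's reversed-index alternating-sum formula and recurrence-verification loop by a
-- single forward pass that solves the radius recurrence symbolically (affine in r0); objective: simpler.

-- ===== PORT A =====
-- A: closed-form alternating sum over reversed indices, sign factors from parity of len(pegs),
-- then a separate loop re-deriving each radius from the recurrence to verify feasibility.
-- 'int(first_radius_x3/3)' is ported as floor division: that branch is reached only when x3 % 3 == 0.
def solution (pegs : List Int) : List Int :=
  let l : Int := (pegs.length : Int)
  let altSum : Int := (PySem.List.pyRange 0 l 1).foldl
    (fun acc i => acc + (1 - 2 * PySem.Int.mod i 2) * PySem.List.pyGetD pegs (l - i - 1) 0) 0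
  let x3 : Int := (2 - 8 * PySem.Int.mod l 2) *
    (2 * altSum - PySem.List.pyGetD pegs (l - 1) 0
      - (-1 + 2 * PySem.Int.mod l 2) * PySem.List.pyGetD pegs 0 0)
  if x3 < 3 then [-1, -1]
  else
    let res : Option Int := (PySem.List.pyRange 0 (l - 1) 1).foldl
      (fun st i =>
        match st with
        | none => none
        | some last =>
          let next := 3 * (PySem.List.pyGetD pegs (i + 1) 0 - PySem.List.pyGetD pegs i 0) - last
          if next < 3 then none else some next) (some x3)
    match res with
    | none => [-1, -1]
    | some _ =>
      if PySem.Int.mod x3 3 = 0 then [PySem.Int.floordiv x3 3, 1] else [x3, 3]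

-- ===== PORT B =====
-- B: each radius is affine in the first one, r_i = a_i + (-1)^i * r0; one forward pass over the
-- consecutive differences builds the constants a_i, the closing constraint r_N = r0/2 gives
-- x3 = 3*r0, and a uniform pass over the stored constants checks feasibility of all radii.
def solution_alt (pegs : List Int) : List Int :=
  if pegs.isEmpty then [-1, -1]
  else
    let diffs : List Int := List.zipWith (fun p q => q - p) pegs pegs.tail
    let a : List Int := diffs.foldl (fun acc d => acc ++ [d - PySem.List.pyGetD acc (-1) 0]) [0]
    let x3 : Int :=
      if PySem.Int.mod (pegs.length : Int) 2 = 0 then 2 * PySem.List.pyGetD a (-1) 0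
      else -6 * PySem.List.pyGetD a (-1) 0
    let fe : Option Int := a.foldl
      (fun st ai =>
        match st with
        | none => none
        | some sign => if 3 * ai + sign * x3 < 3 then none else some (-sign)) (some 1)
    match fe with
    | none => [-1, -1]
    | some _ =>
      if PySem.Int.mod x3 3 = 0 then [PySem.Int.floordiv x3 3, 1] else [x3, 3]

-- ===== PRECONDITION & SPEC =====
-- Pre_ excludes only the empty list, on which A raises IndexError (pegs[-1] on []).
def Pre_solution (pegs : List Int) : Prop := pegs ≠ []
instance (pegs : List Int) : Decidable (Pre_solution pegs) := by unfold Pre_solution; infer_instance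
def pvWitness_solution : List Int := [4, 30, 50]

def Spec_solution (pegs : List Int) (out : List Int) : Prop := out = solution_alt pegs
instance (pegs : List Int) (out : List Int) : Decidable (Spec_solution pegs out) := by unfold Spec_solution; infer_instance

-- ===== CLAIM =====
def Claim_equal_solution : Prop := ∀ (pegs : List Int), Dom_solution pegs → Pre_solution pegs → Spec_solution pegs (solution pegs)

-- ===== LEMMAS AND PROOFS =====

def altsum : List Int → Int
  | [] => 0
  | x :: xs => x - altsum xs

def alast : Int → List Int → Int
  | a, [] => a
  | a, d :: ds => alast (d - a) ds

theorem sum_alt (q : List Int) :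
    ((List.range q.length).map (fun k => (-1 : Int) ^ k * q.getD k 0)).sum = altsum q := by
  induction q with
  | nil => simp [altsum]
  | cons x xs ih =>
    rw [List.length_cons, List.range_succ_eq_map, List.map_cons, List.map_map, List.sum_cons]
    have : ((List.range xs.length).map ((fun k => (-1 : Int) ^ k * (x :: xs).getD k 0) ∘ Nat.succ)).sum
        = ((List.range xs.length).map (fun k => -((-1 : Int) ^ k * xs.getD k 0))).sum := by
      apply congrArg
      apply List.map_congr_left
      intro k _
      simp only [Function.comp, List.getD_cons_succ, pow_succ]
      ring
    rw [this]
    have h2 : ((List.range xs.length).map (fun k => -((-1 : Int) ^ k * xs.getD k 0))).sum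
        = -((List.range xs.length).map (fun k => (-1 : Int) ^ k * xs.getD k 0)).sum := by
      have h := List.sum_neg ((List.range xs.length).map (fun k => (-1 : Int) ^ k * xs.getD k 0))
      rw [List.map_map] at h
      exact h.symm
    rw [h2, ih]
    simp [altsum]
    ring

theorem altsum_append (xs : List Int) (x : Int) :
    altsum (xs ++ [x]) = altsum xs + (-1) ^ xs.length * x := by
  induction xs with
  | nil => simp [altsum]
  | cons y ys ih => simp [altsum, ih, pow_succ]; ring

theorem alast_linear (ds : List Int) (a : Int) :
    alast a ds = alast 0 ds + (-1) ^ ds.length * a := by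
  induction ds generalizing a with
  | nil => simp [alast]
  | cons d ds ih =>
    simp only [alast, List.length_cons]
    rw [ih (d - a), ih (d - 0), pow_succ]
    ring

theorem foldl_range_getD {β : Type} (xs : List Int) (g : β → Int → β) (init : β) :
    (List.range xs.length).foldl (fun st k => g st (xs.getD k 0)) init = xs.foldl g init := by
  induction xs using List.reverseRecOn with
  | nil => simp
  | append_singleton ys y ih =>
    rw [List.length_append, List.length_singleton, List.range_succ, List.foldl_append,
      List.foldl_append]
    have h1 : (List.range ys.length).foldl (fun st k => g st ((ys ++ [y]).getD k 0)) init
        = (List.range ys.length).foldl (fun st k => g st (ys.getD k 0)) init := by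
      apply PySem.List.foldl_congr_mem
      intro acc k hk
      rw [List.getD_append _ _ _ _ (List.mem_range.mp hk)]
    rw [h1, ih]
    simp [List.getD]

def mkdiffs (pegs : List Int) : List Int := List.zipWith (fun p q => q - p) pegs pegs.tail

theorem mkdiffs_cons (p t : Int) (tl : List Int) :
    mkdiffs (p :: t :: tl) = (t - p) :: mkdiffs (t :: tl) := by
  simp [mkdiffs]

theorem mkdiffs_length (x : Int) (xs : List Int) : (mkdiffs (x :: xs)).length = xs.length := by
  simp [mkdiffs]

theorem bracket_eq (p : Int) (tl : List Int) :
    2 * altsum (p :: tl).reverse - (p :: tl).getLast (by simp) + (-1) ^ (p :: tl).length * p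
      = alast 0 (mkdiffs (p :: tl)) := by
  induction tl generalizing p with
  | nil => simp [altsum, mkdiffs, alast]; ring
  | cons t tl2 ih =>
    have hrev : (p :: t :: tl2).reverse = (t :: tl2).reverse ++ [p] := by simp
    rw [hrev, altsum_append, List.getLast_cons (by simp), mkdiffs_cons]
    show _ = alast (t - p - 0) (mkdiffs (t :: tl2))
    rw [alast_linear, mkdiffs_length]
    rw [← ih t]
    simp only [List.length_reverse, List.length_cons, pow_succ]
    ring

def avec : Int → List Int → List Int
  | _, [] => []
  | a, d :: ds => (d - a) :: avec (d - a) ds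

def feas (x3 : Int) : Int → Int → List Int → Bool
  | _, _, [] => true
  | a, s, d :: ds => if 3 * (d - a) + (-s) * x3 < 3 then false else feas x3 (d - a) (-s) ds

def stepV (st : Option Int) (d : Int) : Option Int :=
  match st with
  | none => none
  | some last =>
    let next := 3 * d - last
    if next < 3 then none else some next

def stepS (x3 : Int) (st : Option Int) (ai : Int) : Option Int :=
  match st with
  | none => none
  | some sign => if 3 * ai + sign * x3 < 3 then none else some (-sign)

theorem stepV_none (ds : List Int) : ds.foldl stepV none = none := by
  induction ds with
  | nil => rfl
  | cons d ds ih => simpa [stepV] using ih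

theorem stepS_none (x3 : Int) (ds : List Int) : ds.foldl (stepS x3) none = none := by
  induction ds with
  | nil => rfl
  | cons d ds ih => simpa [stepS] using ih

theorem parity_flip (n : ℕ) (s t : Int) :
    (if 2 ∣ (n + 1) then s else t) = (if 2 ∣ n then t else s) := by
  by_cases h : 2 ∣ n
  · rw [if_neg (by omega), if_pos h]
  · rw [if_pos (by omega), if_neg h]

theorem lemA (x3 : Int) (ds : List Int) : ∀ (a s : Int),
    ds.foldl stepV (some (3 * a + s * x3)) =
      if feas x3 a s ds then some (3 * alast a ds + (if 2 ∣ ds.length then s else -s) * x3)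
      else none := by
  induction ds with
  | nil => intro a s; simp [feas, alast]
  | cons d ds ih =>
    intro a s
    rw [List.foldl_cons]
    have hstep : stepV (some (3 * a + s * x3)) d =
        if 3 * (d - a) + (-s) * x3 < 3 then none else some (3 * (d - a) + (-s) * x3) := by
      have harith : 3 * d - (3 * a + s * x3) = 3 * (d - a) + (-s) * x3 := by ring
      simp only [stepV, harith]
    rw [hstep]
    by_cases hc : 3 * (d - a) + (-s) * x3 < 3
    · rw [if_pos hc, stepV_none, feas, if_pos hc]
      simp
    · rw [if_neg hc, ih (d - a) (-s)]
      rw [feas, if_neg hc]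
      rw [show alast a (d :: ds) = alast (d - a) ds from rfl]
      rw [List.length_cons, parity_flip]
      simp only [neg_neg]

theorem lemB (x3 : Int) (ds : List Int) : ∀ (a s : Int),
    (avec a ds).foldl (stepS x3) (some (-s)) =
      if feas x3 a s ds then some (if 2 ∣ ds.length then -s else s) else none := by
  induction ds with
  | nil => intro a s; simp [avec, feas]
  | cons d ds ih =>
    intro a s
    rw [show avec a (d :: ds) = (d - a) :: avec (d - a) ds from rfl, List.foldl_cons]
    have hstep : stepS x3 (some (-s)) (d - a) =
        if 3 * (d - a) + (-s) * x3 < 3 then none else some (-(-s)) := rfl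
    rw [hstep]
    by_cases hc : 3 * (d - a) + (-s) * x3 < 3
    · rw [if_pos hc, stepS_none, feas, if_pos hc]
      simp
    · rw [if_neg hc]
      simp only [neg_neg]
      have h := ih (d - a) (-s)
      simp only [neg_neg] at h
      rw [h, feas, if_neg hc, List.length_cons, parity_flip]

theorem sign_eq (k : ℕ) : (1 : Int) - 2 * ((k % 2 : ℕ) : Int) = (-1) ^ k := by
  rcases Nat.even_or_odd k with h | h
  · rw [Nat.even_iff.mp h, h.neg_one_pow]
    simp
  · rw [Nat.odd_iff.mp h, h.neg_one_pow]
    simp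

theorem altSum_eq (pegs : List Int) :
    (PySem.List.pyRange 0 (pegs.length : Int) 1).foldl
      (fun acc i => acc + (1 - 2 * PySem.Int.mod i 2) *
        PySem.List.pyGetD pegs ((pegs.length : Int) - i - 1) 0) 0
      = altsum pegs.reverse := by
  rw [PySem.List.pyRange_one, List.foldl_map]
  rw [show (((pegs.length : Int)) - 0).toNat = pegs.length by omega]
  rw [PySem.List.foldl_congr_mem _ _
    (fun acc k => acc + (-1 : Int) ^ k * pegs.reverse.getD k 0) 0 ?_]
  · rw [PySem.List.foldl_add, zero_add, show pegs.length = pegs.reverse.length by simp]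
    exact sum_alt pegs.reverse
  · intro acc k hk
    have hk' : k < pegs.length := List.mem_range.mp hk
    have hmod : PySem.Int.mod ((0 : Int) + (k : Int)) 2 = ((k % 2 : ℕ) : Int) := by
      rw [zero_add]
      exact_mod_cast PySem.Int.mod_natCast k 2
    have hidx : PySem.List.pyGetD pegs ((pegs.length : Int) - (0 + (k : Int)) - 1) 0
        = pegs.reverse.getD k 0 := by
      rw [zero_add]
      rw [PySem.List.pyGetD_eq_getElem pegs 0 (by omega) (by omega)]
      have ht : ((pegs.length : Int) - (k : Int) - 1).toNat = pegs.length - 1 - k := by omega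
      rw [List.getD_eq_getElem _ _ (by simpa using hk'), List.getElem_reverse]
      congr 1
    rw [hmod, hidx, sign_eq]

theorem mkdiffs_getD (pegs : List Int) (k : ℕ) (hk : k < pegs.length - 1) :
    (mkdiffs pegs).getD k 0 = pegs.getD (k + 1) 0 - pegs.getD k 0 := by
  have hlen : (mkdiffs pegs).length = pegs.length - 1 := by
    simp [mkdiffs]
  rw [List.getD_eq_getElem _ _ (by omega), List.getD_eq_getElem _ _ (by omega),
    List.getD_eq_getElem _ _ (by omega)]
  simp only [mkdiffs, List.getElem_zipWith, List.getElem_tail]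

theorem loopA_conv (pegs : List Int) (x3 : Int) :
    (PySem.List.pyRange 0 ((pegs.length : Int) - 1) 1).foldl
      (fun st i =>
        match st with
        | none => none
        | some last =>
          let next := 3 * (PySem.List.pyGetD pegs (i + 1) 0 - PySem.List.pyGetD pegs i 0) - last
          if next < 3 then none else some next) (some x3)
    = (mkdiffs pegs).foldl stepV (some x3) := by
  rw [PySem.List.pyRange_one, List.foldl_map]
  have hlen : (mkdiffs pegs).length = pegs.length - 1 := by simp [mkdiffs]
  have htn : (((pegs.length : Int)) - 1 - 0).toNat = (mkdiffs pegs).length := by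
    rw [hlen]; omega
  rw [htn]
  rw [PySem.List.foldl_congr_mem _ _
    (fun st k => stepV st ((mkdiffs pegs).getD k 0)) (some x3) ?_]
  · exact foldl_range_getD (mkdiffs pegs) stepV (some x3)
  · intro st k hk
    have hk' : k < pegs.length - 1 := by
      have := List.mem_range.mp hk
      omega
    match st with
    | none => rfl
    | some last =>
      have h1 : PySem.List.pyGetD pegs ((0 : Int) + (k : Int) + 1) 0 = pegs.getD (k + 1) 0 := by
        rw [zero_add, PySem.List.pyGetD_eq_getElem pegs 0 (by omega) (by omega)]
        rw [List.getD_eq_getElem _ _ (by omega)]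
        have hn : ((k : Int) + 1).toNat = k + 1 := by omega
        simp only [hn]
      have h2 : PySem.List.pyGetD pegs ((0 : Int) + (k : Int)) 0 = pegs.getD k 0 := by
        rw [zero_add, PySem.List.pyGetD_eq_getElem pegs 0 (by omega) (by omega)]
        rw [List.getD_eq_getElem _ _ (by omega)]
        simp only [Int.toNat_natCast]
      simp only [h1, h2, mkdiffs_getD pegs k hk', stepV]

theorem buildA (ds : List Int) : ∀ (acc : List Int) (h : acc ≠ []),
    ds.foldl (fun acc d => acc ++ [d - PySem.List.pyGetD acc (-1) 0]) acc
      = acc ++ avec (acc.getLast h) ds := by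
  induction ds with
  | nil => intro acc h; simp [avec]
  | cons d ds ih =>
    intro acc h
    rw [List.foldl_cons, PySem.List.pyGetD_neg_one acc 0 h]
    rw [ih (acc ++ [d - acc.getLast h]) (by simp)]
    rw [List.getLast_append_singleton]
    rw [show avec (acc.getLast h) (d :: ds) = (d - acc.getLast h) :: avec (d - acc.getLast h) ds
      from rfl]
    simp

theorem lastA (ds : List Int) : ∀ (a : Int),
    (a :: avec a ds).getLast (List.cons_ne_nil a _) = alast a ds := by
  induction ds with
  | nil => intro a; rfl
  | cons d ds ih =>
    intro a
    rw [show avec a (d :: ds) = (d - a) :: avec (d - a) ds from rfl]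
    rw [List.getLast_cons (List.cons_ne_nil _ _)]
    exact ih (d - a)

theorem lemA' (x3 : Int) (ds : List Int) :
    ds.foldl stepV (some x3) =
      if feas x3 0 1 ds then some (3 * alast 0 ds + (if 2 ∣ ds.length then 1 else -1) * x3)
      else none := by
  rw [show (some x3 : Option Int) = some (3 * 0 + 1 * x3) by norm_num]
  exact lemA x3 ds 0 1

theorem lemB_port (x3 : Int) (ds : List Int) :
    ((0 : Int) :: avec 0 ds).foldl
      (fun st ai =>
        match st with
        | none => none
        | some sign => if 3 * ai + sign * x3 < 3 then none else some (-sign)) (some 1)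
    = if x3 < 3 then none
      else if feas x3 0 1 ds then some (if 2 ∣ ds.length then (-1 : Int) else 1) else none := by
  have hfun : (fun st ai =>
      match st with
      | none => none
      | some sign => if 3 * ai + sign * x3 < 3 then none else some (-sign)) = stepS x3 := rfl
  rw [hfun, List.foldl_cons]
  have h0 : stepS x3 (some 1) 0 = if x3 < 3 then none else some (-1) := by
    show (if 3 * 0 + 1 * x3 < 3 then none else some (-(1 : Int))) = _
    norm_num
  rw [h0]
  by_cases hx : x3 < 3
  · rw [if_pos hx, if_pos hx, stepS_none]
  · rw [if_neg hx, if_neg hx]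
    rw [show (some (-1) : Option Int) = some (-(1 : Int)) by norm_num]
    exact lemB x3 ds 0 1

def solutionX (pegs : List Int) : Int := (if 2 ∣ pegs.length then 2 else -6) * alast 0 (mkdiffs pegs)

theorem main_test (p : Int) (tl : List Int) : solution (p :: tl) = solution_alt (p :: tl) := by
  simp only [solution, solution_alt]
  simp only [List.isEmpty_cons, Bool.false_eq_true, if_false]
  have hmk : List.zipWith (fun p q => q - p) (p :: tl) ((p :: tl).tail) = mkdiffs (p :: tl) := rfl
  simp only [hmk]
  have hbuild : List.foldl (fun acc d => acc ++ [d - PySem.List.pyGetD acc (-1) 0]) [0]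
      (mkdiffs (p :: tl)) = (0 : Int) :: avec 0 (mkdiffs (p :: tl)) := by
    rw [buildA (mkdiffs (p :: tl)) [0] (by simp)]
    simp
  simp only [hbuild]
  have hlastv : PySem.List.pyGetD ((0 : Int) :: avec 0 (mkdiffs (p :: tl))) (-1) 0
      = alast 0 (mkdiffs (p :: tl)) := by
    rw [PySem.List.pyGetD_neg_one _ _ (List.cons_ne_nil _ _)]
    exact lastA _ 0
  simp only [hlastv]
  have hmod : PySem.Int.mod ((p :: tl).length : Int) 2 = (((p :: tl).length % 2 : ℕ) : Int) := by
    exact_mod_cast PySem.Int.mod_natCast (p :: tl).length 2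
  have hxB : (if PySem.Int.mod ((p :: tl).length : Int) 2 = 0
        then 2 * alast 0 (mkdiffs (p :: tl)) else -6 * alast 0 (mkdiffs (p :: tl)))
      = solutionX (p :: tl) := by
    rw [hmod, solutionX]
    by_cases h : 2 ∣ (p :: tl).length
    · rw [if_pos (by omega : (((p :: tl).length % 2 : ℕ) : Int) = 0), if_pos h]
    · rw [if_neg (by omega : ¬ (((p :: tl).length % 2 : ℕ) : Int) = 0), if_neg h]
  simp only [hxB]
  simp only [altSum_eq (p :: tl)]
  simp only [hmod]
  have hlastpeg : PySem.List.pyGetD (p :: tl) ((((p :: tl).length : Int)) - 1) 0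
      = (p :: tl).getLast (List.cons_ne_nil _ _) := by
    rw [PySem.List.pyGetD_eq_getElem _ 0 (by simp) (by simp)]
    rw [List.getLast_eq_getElem]
    congr 1
    simp
  simp only [hlastpeg, PySem.List.pyGetD_zero_cons]
  have hxA : (2 - 8 * (((p :: tl).length % 2 : ℕ) : Int)) *
      (2 * altsum (p :: tl).reverse - (p :: tl).getLast (List.cons_ne_nil _ _)
        - (-1 + 2 * (((p :: tl).length % 2 : ℕ) : Int)) * p)
      = solutionX (p :: tl) := by
    rw [solutionX, ← bracket_eq p tl]
    by_cases h : 2 ∣ (p :: tl).length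
    · have h0 : (p :: tl).length % 2 = 0 := by omega
      have hpow : (-1 : Int) ^ (p :: tl).length = 1 :=
        Even.neg_one_pow ((Nat.even_iff).mpr h0)
      rw [if_pos h, h0, hpow]
      push_cast
      ring
    · have h1 : (p :: tl).length % 2 = 1 := by omega
      have hpow : (-1 : Int) ^ (p :: tl).length = -1 :=
        Odd.neg_one_pow ((Nat.odd_iff).mpr h1)
      rw [if_neg h, h1, hpow]
      push_cast
      ring
  simp only [hxA]
  rw [loopA_conv (p :: tl) (solutionX (p :: tl))]
  rw [lemA']
  rw [lemB_port]
  by_cases hX : solutionX (p :: tl) < 3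
  · rw [if_pos hX, if_pos hX]
  · rw [if_neg hX, if_neg hX]
    by_cases hf : feas (solutionX (p :: tl)) 0 1 (mkdiffs (p :: tl)) = true
    · rw [if_pos hf, if_pos hf]
    · rw [if_neg hf, if_neg hf]

theorem solution_spec : Claim_equal_solution := by
  intro pegs hdom hpre
  unfold Spec_solution
  match pegs, hpre with
  | p :: tl, _ => exact main_test p tl
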